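-- pv_equiv track=rewrite | github.com/StarfBerry/poke-scripts | RNG/LCG_Reversal.py | lcrng_recover_pid_seeds_2
-- ===== SOURCE A (Python) =====
-- def lcrng_prev(s):
--     return (s * 0xEEB9EB65 + 0x0A3561A1) & 0xffffffff
--
-- LCRNG_MUL_2 = 0xC2A29A69 # LCRNG_MUL^2
--
-- LCRNG_ADD_2 = 0xE97E7B6A # LCRNG_ADD * (1 + LCRNG_MUL)
--
-- LCRNG_MOD_2 = 0x3A89     # u32(0x3a89 * LCRNG_MUL_2) < 2^16 (for seed and seed + 0x3a89, we have a good chance that the 16bit high of the next output will be the same for both)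
--
-- LCRNG_PAT_2 = 0x2E4C     # pattern in the distribution of the "low solutions" modulo 0x3a89
--
-- LCRNG_INC_2 = 0x5831     # (((diff * 0x3a89 + 0x5831) >> 16) * 0x2e4c) % 0x3a89 line up with the first 16bit low solution modulo 0x3a89 if it exists (see diff definition in code)
--
-- def lcrng_recover_pid_seeds_2(pid):
--     first = (pid & 0xffff) << 16
--     second = pid & 0xffff0000
--
--     diff = ((second - (first * LCRNG_MUL_2 + LCRNG_ADD_2)) >> 16) & 0xffff
--     start = (((diff * LCRNG_MOD_2 + LCRNG_INC_2) >> 16) * LCRNG_PAT_2) % LCRNG_MOD_2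
--
--     seeds = []
--     for low in range(start, 0x10000, LCRNG_MOD_2): # at most 5 iterations
--         if ((test := first | low) * LCRNG_MUL_2 + LCRNG_ADD_2) & 0xffff0000 == second:
--             seeds.append(lcrng_prev(test))
--
--     return seeds
-- ===== SOURCE B (Python) =====
-- def lcrng_prev(s):
--     return (s * 0xEEB9EB65 + 0x0A3561A1) & 0xffffffff
--
-- LCRNG_MUL_2 = 0xC2A29A69
-- LCRNG_ADD_2 = 0xE97E7B6A
--
-- def lcrng_recover_pid_seeds_2(pid):
--     first = (pid & 0xffff) << 16
--     second = pid & 0xffff0000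
--     seeds = []
--     for low in range(0x10000):
--         if ((first | low) * LCRNG_MUL_2 + LCRNG_ADD_2) & 0xffff0000 == second:
--             seeds.append(lcrng_prev(first | low))
--     return seeds
-- ===== Notes on version B (the rewrite author's own statement) =====
-- stated objective: simpler
-- what changed: B drops A's modular sieve (the diff/start arithmetic with the magic constants LCRNG_MOD_2/LCRNG_PAT_2/LCRNG_INC_2 that scans only a handful of candidate lows) and instead scans every possible sixteen-bit low half with the same match test; equal output rests on the proved fact that every matching low is congruent to A's start value modulo LCRNG_MOD_2.
import Mathlib
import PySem

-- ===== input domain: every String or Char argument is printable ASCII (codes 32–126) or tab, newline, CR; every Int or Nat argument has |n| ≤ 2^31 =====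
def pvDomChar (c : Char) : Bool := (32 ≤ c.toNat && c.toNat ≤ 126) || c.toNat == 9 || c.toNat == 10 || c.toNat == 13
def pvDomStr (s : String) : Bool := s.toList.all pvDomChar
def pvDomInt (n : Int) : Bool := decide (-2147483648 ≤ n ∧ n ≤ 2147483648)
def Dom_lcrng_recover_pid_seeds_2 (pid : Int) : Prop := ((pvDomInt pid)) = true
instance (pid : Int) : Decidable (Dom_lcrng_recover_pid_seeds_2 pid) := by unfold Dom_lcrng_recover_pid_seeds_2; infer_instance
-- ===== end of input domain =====

-- B replaces A's modular sieve (diff/start magic-constant arithmetic over ~5 candidates) by a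
-- plain exhaustive scan of all 2^16 low halves with the same match test; objective: simpler.

-- ===== PORT A =====
def lcrng_prev (s : Int) : Int := PySem.Int.band (s * 0xEEB9EB65 + 0x0A3561A1) 0xffffffff

def lcrng_recover_pid_seeds_2 (pid : Int) : List Int :=
  let first : Int := (PySem.Int.band pid 0xffff) <<< (16:Nat)
  let second : Int := PySem.Int.band pid 0xffff0000
  let diff : Int := PySem.Int.band ((second - (first * 0xC2A29A69 + 0xE97E7B6A)) >>> (16:Nat)) 0xffff
  let start : Int := PySem.Int.mod (((diff * 0x3A89 + 0x5831) >>> (16:Nat)) * 0x2E4C) 0x3A89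
  (PySem.List.pyRange start 0x10000 0x3A89).foldl
    (fun seeds low =>
      let test := PySem.Int.bor first low
      if PySem.Int.band (test * 0xC2A29A69 + 0xE97E7B6A) 0xffff0000 = second
      then seeds ++ [lcrng_prev test] else seeds) []

-- ===== PORT B =====
def lcrng_recover_pid_seeds_2_alt (pid : Int) : List Int :=
  let first : Int := (PySem.Int.band pid 0xffff) <<< (16:Nat)
  let second : Int := PySem.Int.band pid 0xffff0000
  (PySem.List.pyRange 0 0x10000 1).foldl
    (fun seeds low =>
      if PySem.Int.band ((PySem.Int.bor first low) * 0xC2A29A69 + 0xE97E7B6A) 0xffff0000 = second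
      then seeds ++ [lcrng_prev (PySem.Int.bor first low)] else seeds) []

-- ===== PRECONDITION & SPEC =====
def Spec_lcrng_recover_pid_seeds_2 (pid : Int) (out : List Int) : Prop := out = lcrng_recover_pid_seeds_2_alt pid
instance (pid : Int) (out : List Int) : Decidable (Spec_lcrng_recover_pid_seeds_2 pid out) := by unfold Spec_lcrng_recover_pid_seeds_2; infer_instance

-- ===== CLAIM (what is proved, stated in full; the proofs are below) =====
def Claim_equal_lcrng_recover_pid_seeds_2 : Prop := ∀ (pid : Int), Dom_lcrng_recover_pid_seeds_2 pid → Spec_lcrng_recover_pid_seeds_2 pid (lcrng_recover_pid_seeds_2 pid)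

-- ===== LEMMAS AND PROOFS =====

-- Nat bit lemmas for the three masks/ops the ports use
theorem pvNatAndMidGen (n k : Nat) : n &&& ((2^k - 1) <<< k) = n / 2^k % 2^k * 2^k := by
  have h2 : n / 2^k % 2^k * 2^k = ((n >>> k) % 2^k) <<< k := by
    simp [Nat.shiftLeft_eq, Nat.shiftRight_eq_div_pow]
  rw [h2]
  apply Nat.eq_of_testBit_eq
  intro i
  simp only [Nat.testBit_and, Nat.testBit_shiftLeft, Nat.testBit_mod_two_pow,
    Nat.testBit_shiftRight, Nat.testBit_two_pow_sub_one]
  rcases Nat.lt_or_ge i k with h | h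
  · simp [Nat.not_le.mpr h]
  · have : k + (i - k) = i := by omega
    simp [h, this, ge_iff_le]
    by_cases hi : i - k < k <;> simp [hi]

theorem pvNatOrAddGen (k a b : Nat) (h : b < 2^k) : (a <<< k) ||| b = a * 2^k + b := by
  induction k generalizing a b with
  | zero =>
    have : b = 0 := by omega
    subst this; simp
  | succ k ih =>
    have hbd := Nat.bodd_add_div2 b
    have hp : (2:Nat)^(k+1) = 2*2^k := by ring
    have hdb : b.div2 < 2^k := by rw [hp] at h; omega
    have ha : a <<< (k+1) = Nat.bit false (a <<< k) := by
      simp [Nat.bit_val, Nat.shiftLeft_eq]; ring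
    have h2 : a*(2*2^k) = 2*(a*2^k) := by ring
    calc (a <<< (k+1)) ||| b = Nat.bit false (a <<< k) ||| Nat.bit b.bodd b.div2 := by
            rw [← ha, Nat.bit_bodd_div2]
      _ = Nat.bit (false || b.bodd) ((a <<< k) ||| b.div2) := Nat.lor_bit _ _ _ _
      _ = 2*(a * 2^k + b.div2) + b.bodd.toNat := by rw [ih a b.div2 hdb, Nat.bit_val, Bool.false_or]
      _ = a * 2^(k+1) + b := by rw [hp, h2]; omega

-- Int-level readings of the Python primitives used by the ports
theorem pvBandLow (a : Int) : PySem.Int.band a 0xffff = a % 65536 := by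
  unfold PySem.Int.band
  have hm : ((0xffff:Int)).toNat = 65535 := by decide
  rcases le_or_gt 0 a with h | h
  · rw [if_pos h, if_pos (by norm_num)]
    have := Nat.and_two_pow_sub_one_eq_mod a.toNat 16
    norm_num at this
    rw [hm, this]
    omega
  · rw [if_neg (by omega), if_pos (by norm_num)]
    have hmod : (-a-1).toNat &&& 65535 = (-a-1).toNat % 65536 := by
      have h' := Nat.and_two_pow_sub_one_eq_mod (-a-1).toNat 16
      rwa [show (2:Nat)^16 - 1 = 65535 from by norm_num, show (2:Nat)^16 = 65536 from by norm_num] at h'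
    rw [hm, Nat.and_comm, hmod]
    omega

theorem pvBandMid (a : Int) : PySem.Int.band a 0xffff0000 = a % 4294967296 - a % 65536 := by
  unfold PySem.Int.band
  have key : ∀ n : Nat, n &&& 4294901760 = n / 65536 % 65536 * 65536 := by
    intro n
    have := pvNatAndMidGen n 16
    norm_num [Nat.shiftLeft_eq] at this
    exact this
  have hm : ((0xffff0000:Int)).toNat = 4294901760 := by decide
  rcases le_or_gt 0 a with h | h
  · rw [if_pos h, if_pos (by norm_num)]
    rw [hm, key a.toNat]
    omega
  · rw [if_neg (by omega), if_pos (by norm_num)]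
    rw [hm, Nat.and_comm, key (-a-1).toNat]
    omega

theorem pvBorAdd (F x : Int) (hF : 0 ≤ F) (hx0 : 0 ≤ x) (hx : x < 65536) :
    PySem.Int.bor (F * 65536) x = F * 65536 + x := by
  unfold PySem.Int.bor
  rw [if_pos (by positivity), if_pos hx0]
  have h1 : (F * 65536).toNat = F.toNat <<< 16 := by
    rw [Nat.shiftLeft_eq]; omega
  rw [h1, pvNatOrAddGen 16 F.toNat x.toNat (by omega)]
  omega

theorem pvShl16 (a : Int) : a <<< (16:Nat) = a * 65536 := by
  rw [Int.shiftLeft_eq]; norm_num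

theorem pvShr16 (a : Int) : a >>> (16:Nat) = a / 65536 := by
  have h := Int.shiftRight_eq_div_pow a 16
  norm_num at h
  exact h

-- the finite core fact behind A's sieve, established by kernel computation in balanced chunks
def pvP (x : Nat) : Bool :=
  ((x * 3265436265 % 4294967296 + 4294967296 - (x * 3265436265 % 4294967296 + 3917380458) % 65536)
      % 4294967296 / 65536 * 14985 + 22577) / 65536 * 11852 % 14985 == x % 14985

def pvChk : Nat → Nat → Bool
  | 0, lo => pvP lo
  | d+1, lo => pvChk d lo && pvChk d (lo + 2^d)

theorem pvChk_all : ∀ d lo, pvChk d lo = true → ∀ i, i < 2^d → pvP (lo + i) = true := by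
  intro d
  induction d with
  | zero => intro lo h i hi; interval_cases i; simpa using h
  | succ d ih =>
    intro lo h i hi
    rw [pvChk] at h
    simp only [Bool.and_eq_true] at h
    by_cases hc : i < 2^d
    · exact ih lo h.1 i hc
    · have hlt : i - 2^d < 2^d := by have := Nat.pow_succ 2 d; omega
      have hv := ih (lo + 2^d) h.2 (i - 2^d) hlt
      have he : lo + 2^d + (i - 2^d) = lo + i := by omega
      rwa [he] at hv

set_option maxHeartbeats 4000000 in
theorem pvChk16 : pvChk 16 0 = true := by decide

theorem pvFF : ∀ x : Nat, x < 65536 →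
    ((x * 3265436265 % 4294967296 + 4294967296 - (x * 3265436265 % 4294967296 + 3917380458) % 65536)
        % 4294967296 / 65536 * 14985 + 22577) / 65536 * 11852 % 14985 = x % 14985 := by
  intro x hx
  have h := pvChk_all 16 0 pvChk16 x (by omega)
  simpa [pvP] using h

-- congruence steps linking A's diff/start computation to the finite fact
theorem pvStepR (C y : Int) (hC : C % 65536 = 3917380458 % 65536) :
    (C + y) % 65536 = (y % 4294967296 + 3917380458) % 65536 := by
  omega

theorem pvStepD (C y T F : Int)
    (hp : (C + y) % 4294967296 - (C + y) % 65536 = T - F)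
    (hr : (C + y) % 65536 = (y % 4294967296 + 3917380458) % 65536) :
    (T - F - C) % 4294967296
      = (y % 4294967296 + 4294967296 - (y % 4294967296 + 3917380458) % 65536) % 4294967296 := by
  omega

theorem pvStepDiv (z : Int) : z / 65536 % 65536 = z % 4294967296 / 65536 := by
  omega

theorem pvFFInt (x : Int) (hx0 : 0 ≤ x) (hx : x < 65536) :
    ((x * 3265436265 % 4294967296 + 4294967296 - (x * 3265436265 % 4294967296 + 3917380458) % 65536)
        % 4294967296 / 65536 * 14985 + 22577) / 65536 * 11852 % 14985 = x % 14985 := by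
  obtain ⟨n, rfl⟩ : ∃ n : Nat, x = (n : Int) := ⟨x.toNat, by omega⟩
  have h := pvFF n (by omega)
  have hle : (n * 3265436265 % 4294967296 + 3917380458) % 65536
      ≤ n * 3265436265 % 4294967296 + 4294967296 := by omega
  zify [hle] at h
  exact h

theorem pvBridge (F T x : Int) (hx0 : 0 ≤ x) (hx : x < 65536)
    (hp : ((F*65536 + x) * 3265436265 + 3917380458) % 4294967296 - ((F*65536 + x) * 3265436265 + 3917380458) % 65536 = T - F) :
    x % 14985 = ((T - F - (F*65536*3265436265 + 3917380458)) / 65536 % 65536 * 14985 + 22577) / 65536 * 11852 % 14985 := by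
  have hB : ((F*65536 + x) * 3265436265 + 3917380458) = (F*65536*3265436265 + 3917380458) + x*3265436265 := by ring
  rw [hB] at hp
  have hC : (F*65536*3265436265 + 3917380458) % 65536 = 3917380458 % 65536 := by omega
  have hr := pvStepR (F*65536*3265436265 + 3917380458) (x*3265436265) hC
  have hd0 := pvStepD (F*65536*3265436265 + 3917380458) (x*3265436265) T F hp hr
  rw [pvStepDiv, hd0]
  exact (pvFFInt x hx0 hx).symm

-- every low half that passes the match test is congruent to A's start modulo 0x3a89
theorem pvMain (pid x : Int) (hx0 : 0 ≤ x) (hx : x < 65536)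
    (hp : PySem.Int.band ((PySem.Int.bor ((PySem.Int.band pid 0xffff) <<< (16:Nat)) x) * 0xC2A29A69 + 0xE97E7B6A) 0xffff0000
          = PySem.Int.band pid 0xffff0000) :
    x % 0x3A89 = PySem.Int.mod (((PySem.Int.band ((PySem.Int.band pid 0xffff0000 - ((PySem.Int.band pid 0xffff <<< (16:Nat)) * 0xC2A29A69 + 0xE97E7B6A)) >>> (16:Nat)) 0xffff * 0x3A89 + 0x5831) >>> (16:Nat)) * 0x2E4C) 0x3A89 := by
  rw [pvBandLow pid, pvShl16] at hp ⊢
  rw [pvBorAdd (pid % 65536) x (by omega) hx0 hx] at hp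
  rw [pvBandMid, pvBandMid] at hp
  rw [pvBandMid, pvShr16, pvBandLow, pvShr16, PySem.Int.mod_eq_emod_of_pos (by norm_num)]
  exact pvBridge (pid % 65536) (pid % 4294967296) x hx0 hx hp

-- the two filtered ranges coincide
theorem pvPairwiseStep (a b s : Int) (hs : 0 < s) : (PySem.List.pyRange a b s).Pairwise (· < ·) := by
  rw [PySem.List.pyRange_of_pos a b hs]
  refine List.Pairwise.map _ ?_ (List.pairwise_lt_range)
  intro i j hij
  have hij' : (i:Int) < (j:Int) := by exact_mod_cast hij
  have := Int.mul_lt_mul_of_pos_left hij' hs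
  omega

theorem pvEqOfPerm (l1 l2 : List Int) (hp : l1.Perm l2) (h1 : l1.Pairwise (· < ·))
    (h2 : l2.Pairwise (· < ·)) : l1 = l2 :=
  List.Perm.eq_of_pairwise (fun _ _ _ _ ha hb => absurd hb (lt_asymm ha)) h1 h2 hp

theorem pvFilterRange (p : Int → Bool) (a : Int) (h0 : 0 ≤ a) (ha : a < 14985)
    (hres : ∀ x : Int, 0 ≤ x → x < 65536 → p x = true → x % 14985 = a) :
    (PySem.List.pyRange 0 65536 1).filter p = (PySem.List.pyRange a 65536 14985).filter p := by
  apply pvEqOfPerm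
  · rw [List.perm_ext_iff_of_nodup (List.Nodup.filter _ (PySem.List.nodup_pyRange_one 0 65536))
      (List.Nodup.filter _ ((pvPairwiseStep a 65536 14985 (by norm_num)).nodup))]
    intro x
    rw [List.mem_filter, List.mem_filter, PySem.List.mem_pyRange_one,
      PySem.List.mem_pyRange_iff_of_pos (by norm_num : (0:Int) < 14985)]
    constructor
    · rintro ⟨⟨hx0, hx⟩, hpx⟩
      have hm := hres x hx0 hx hpx
      refine ⟨⟨?_, hx, ?_⟩, hpx⟩ <;> omega
    · rintro ⟨⟨hax, hx, hdvd⟩, hpx⟩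
      exact ⟨⟨by omega, hx⟩, hpx⟩
  · exact List.Pairwise.sublist List.filter_sublist (PySem.List.pairwise_lt_pyRange_one 0 65536)
  · exact List.Pairwise.sublist List.filter_sublist (pvPairwiseStep a 65536 14985 (by norm_num))

theorem pvPorts (pid : Int) : lcrng_recover_pid_seeds_2 pid = lcrng_recover_pid_seeds_2_alt pid := by
  unfold lcrng_recover_pid_seeds_2 lcrng_recover_pid_seeds_2_alt
  simp only [PySem.List.foldl_append_ite
    (fun low => PySem.Int.band ((PySem.Int.bor ((PySem.Int.band pid 0xffff) <<< (16:Nat)) low) * 0xC2A29A69 + 0xE97E7B6A) 0xffff0000 = PySem.Int.band pid 0xffff0000)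
    (fun low => lcrng_prev (PySem.Int.bor ((PySem.Int.band pid 0xffff) <<< (16:Nat)) low)),
    List.nil_append]
  refine congrArg _ ?_
  refine (pvFilterRange _ _ ?_ ?_ ?_).symm
  · exact PySem.Int.mod_nonneg _ (by norm_num)
  · exact PySem.Int.mod_lt _ (by norm_num)
  · intro x hx0 hx hpx
    rw [decide_eq_true_eq] at hpx
    exact pvMain pid x hx0 hx hpx

-- ===== VERDICT (by name: the statement is the Claim_ definition above) =====
theorem lcrng_recover_pid_seeds_2_spec : Claim_equal_lcrng_recover_pid_seeds_2 := by
  intro pid _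
  unfold Spec_lcrng_recover_pid_seeds_2
  exact pvPorts pid
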